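-- pv_equiv track=rewrite | github.com/marvinquiet/BART_chipatlas_analysis | find_overlap_keep_info_NOT_sep_strand_lastColMarked.py | get_overlap_info_numID
-- ===== SOURCE A (Python) =====
-- import re,bisect
--
-- def get_overlap_info_numID(islands,regions):
--     # for each island in islands[chrom], check if 1-overlap 0-non-overlap with regions[chrom]
--     overlapped,nonoverlapped = {},{}
--     for chrom in islands:
--         if chrom not in regions:
--             for island in islands[chrom]:
--                 if chrom not in nonoverlapped:
--                     nonoverlapped[chrom] = []
--                 nonoverlapped[chrom].append(island)
--         else:
--             # check the regions in regions[chrom] are non-overlap and sorted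
--             regionStart,regionEnd = [],[]
--             leftEnd=0
--             for region in regions[chrom]:
--                 assert leftEnd <= region[0]<=region[1]
--                 regionStart.append(region[0])
--                 regionEnd.append(region[1])
--                 leftEnd=region[1]
--
--             # for each island, check if overlapped with regions[chrom]
--             for island in islands[chrom]:
--                 assert island[0]<=island[1]
--                 e = bisect.bisect_right(regionEnd,island[0])
--                 s = bisect.bisect_left(regionStart,island[1])
--                 if s > e :
--                     if chrom not in overlapped:
--                         overlapped[chrom] = []
--                     overlapped[chrom].append(island)
--                 else:
--                     if chrom not in nonoverlapped:
--                         nonoverlapped[chrom] = []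
--                     nonoverlapped[chrom].append(island)
--                 #i+=1
--     return overlapped,nonoverlapped
-- ===== SOURCE B (Python) =====
-- def get_overlap_info_numID(islands, regions):
--     # linear-scan classification: an island overlaps iff some region starts before
--     # the island ends and ends after the island starts (strict on both ends,
--     # matching the bisect semantics on sorted non-overlapping regions)
--     overlapped, nonoverlapped = {}, {}
--     for chrom, isls in islands.items():
--         regs = regions.get(chrom, [])
--         for island in isls:
--             if any(r[0] < island[1] and r[1] > island[0] for r in regs):
--                 overlapped.setdefault(chrom, []).append(island)
--             else:
--                 nonoverlapped.setdefault(chrom, []).append(island)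
--     return overlapped, nonoverlapped
-- ===== Notes on version B (the rewrite author's own statement) =====
-- stated objective: simpler
-- what changed: Replaces the start/end index arrays plus bisect_right/bisect_left binary searches with a direct linear any()-scan of the regions (strict overlap test r[0] < island[1] and r[1] > island[0]) and setdefault/dict.get in place of the explicit membership-check bookkeeping.
import Mathlib
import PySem

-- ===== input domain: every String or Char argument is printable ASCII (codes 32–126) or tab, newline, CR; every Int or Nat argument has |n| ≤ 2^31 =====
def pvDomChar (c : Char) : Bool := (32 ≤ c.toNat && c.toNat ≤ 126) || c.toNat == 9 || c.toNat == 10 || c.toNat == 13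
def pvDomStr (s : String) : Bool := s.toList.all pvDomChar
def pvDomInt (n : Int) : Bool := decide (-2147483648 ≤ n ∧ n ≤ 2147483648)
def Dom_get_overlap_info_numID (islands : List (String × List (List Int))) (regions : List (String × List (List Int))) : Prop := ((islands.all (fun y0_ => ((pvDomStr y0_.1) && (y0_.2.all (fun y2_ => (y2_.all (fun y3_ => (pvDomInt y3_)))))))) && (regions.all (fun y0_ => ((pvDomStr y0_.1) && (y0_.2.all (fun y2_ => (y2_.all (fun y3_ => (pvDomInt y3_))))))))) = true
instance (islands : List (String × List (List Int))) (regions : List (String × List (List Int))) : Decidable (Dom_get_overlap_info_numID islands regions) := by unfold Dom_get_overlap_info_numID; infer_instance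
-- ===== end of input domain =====

-- B replaces A's start/end index arrays + bisect binary searches by a direct linear
-- overlap scan of the regions and setdefault-style dict bookkeeping (simpler, not faster).


-- ===== PORT A =====
-- 'if chrom not in d: d[chrom] = []' followed by 'd[chrom].append(island)'
def pyAppendA (d : PySem.Dict String (List (List Int))) (k : String) (v : List Int) :
    PySem.Dict String (List (List Int)) :=
  let d1 := if d.contains k then d else d.insert k []
  d1.insert k (d1.getD k [] ++ [v])

-- literal port of A; the two asserts raise exactly outside Pre_ (excluded there), so the
-- port reads indices with pyGetD (total form, exact under Pre_'s length ≥ 2 bounds)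
def get_overlap_info_numID (islands : List (String × List (List Int))) (regions : List (String × List (List Int))) : (List (String × List (List Int))) × (List (String × List (List Int))) :=
  let rdict := PySem.Dict.mk regions
  let res : PySem.Dict String (List (List Int)) × PySem.Dict String (List (List Int)) :=
    islands.foldl (fun acc p =>
      let chrom := p.1
      if rdict.contains chrom = false then
        (acc.1, p.2.foldl (fun nv island => pyAppendA nv chrom island) acc.2)
      else
        -- build regionStart / regionEnd / leftEnd exactly as the validation loop does
        let tr := (rdict.getD chrom []).foldl
          (fun (st : List Int × List Int × Int) region =>
            (st.1 ++ [PySem.List.pyGetD region 0 0],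
             st.2.1 ++ [PySem.List.pyGetD region 1 0],
             PySem.List.pyGetD region 1 0)) ([], [], (0 : Int))
        let regionStart := tr.1
        let regionEnd := tr.2.1
        p.2.foldl (fun a2 island =>
          let e := PySem.List.bisectRight regionEnd (PySem.List.pyGetD island 0 0)
          let s := PySem.List.bisectLeft regionStart (PySem.List.pyGetD island 1 0)
          if e < s then (pyAppendA a2.1 chrom island, a2.2)
          else (a2.1, pyAppendA a2.2 chrom island)) acc)
      (PySem.Dict.empty, PySem.Dict.empty)
  (res.1.items, res.2.items)

-- ===== PORT B =====
def get_overlap_info_numID_alt (islands : List (String × List (List Int))) (regions : List (String × List (List Int))) : (List (String × List (List Int))) × (List (String × List (List Int))) :=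
  let rdict := PySem.Dict.mk regions
  let res : PySem.Dict String (List (List Int)) × PySem.Dict String (List (List Int)) :=
    islands.foldl (fun acc p =>
      let regs := rdict.getD p.1 []   -- regions.get(chrom, [])
      p.2.foldl (fun a2 island =>
        if regs.any (fun r =>
            decide (PySem.List.pyGetD r 0 0 < PySem.List.pyGetD island 1 0) &&
            decide (PySem.List.pyGetD r 1 0 > PySem.List.pyGetD island 0 0)) then
          (a2.1.modify p.1 [] (· ++ [island]), a2.2)
        else
          (a2.1, a2.2.modify p.1 [] (· ++ [island]))) acc)
      (PySem.Dict.empty, PySem.Dict.empty)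
  (res.1.items, res.2.items)

-- ===== PRECONDITION & SPEC =====
-- Pre_ = exactly where A returns: whenever a chromosome of islands also occurs in regions,
-- its regions must pass A's validation asserts (length ≥ 2, 0 ≤ first start, start ≤ end,
-- chained end ≤ next start) and each of its islands must have length ≥ 2 with start ≤ end
-- (A raises AssertionError/IndexError otherwise).
def Pre_get_overlap_info_numID (islands : List (String × List (List Int))) (regions : List (String × List (List Int))) : Prop :=
  ∀ p ∈ islands, (PySem.Dict.mk regions).contains p.1 = true →
    (let regs := (PySem.Dict.mk regions).getD p.1 []
     (∀ r ∈ regs, 2 ≤ r.length ∧ PySem.List.pyGetD r 0 0 ≤ PySem.List.pyGetD r 1 0) ∧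
     List.IsChain (fun r1 r2 => PySem.List.pyGetD r1 1 0 ≤ PySem.List.pyGetD r2 0 0) regs ∧
     (∀ r ∈ regs.take 1, 0 ≤ PySem.List.pyGetD r 0 0) ∧
     (∀ island ∈ p.2, 2 ≤ island.length ∧ PySem.List.pyGetD island 0 0 ≤ PySem.List.pyGetD island 1 0))

instance (islands : List (String × List (List Int))) (regions : List (String × List (List Int))) : Decidable (Pre_get_overlap_info_numID islands regions) := by
  unfold Pre_get_overlap_info_numID; infer_instance

def pvWitness_get_overlap_info_numID : (List (String × List (List Int))) × (List (String × List (List Int))) :=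
  ([("chr1", [[1, 4, 7], [5, 6, 8]]), ("chr2", [[0, 2]])], [("chr1", [[0, 2], [3, 3]])])

def Spec_get_overlap_info_numID (islands : List (String × List (List Int))) (regions : List (String × List (List Int))) (out : (List (String × List (List Int))) × (List (String × List (List Int)))) : Prop := out = get_overlap_info_numID_alt islands regions
instance (islands : List (String × List (List Int))) (regions : List (String × List (List Int))) (out : (List (String × List (List Int))) × (List (String × List (List Int)))) : Decidable (Spec_get_overlap_info_numID islands regions out) := by unfold Spec_get_overlap_info_numID; infer_instance

-- ===== CLAIM (what is proved, stated in full; the proofs are below) =====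
def Claim_equal_get_overlap_info_numID : Prop := ∀ (islands : List (String × List (List Int))) (regions : List (String × List (List Int))), Dom_get_overlap_info_numID islands regions → Pre_get_overlap_info_numID islands regions → Spec_get_overlap_info_numID islands regions (get_overlap_info_numID islands regions)

-- ===== LEMMAS AND PROOFS =====

-- A's two-step append equals B's modify
theorem pyAppendA_eq_modify (d : PySem.Dict String (List (List Int))) (k : String) (v : List Int) :
    pyAppendA d k v = d.modify k [] (· ++ [v]) := by
  unfold pyAppendA
  by_cases h : d.contains k = true
  · simp only [h, if_pos]
    rfl
  · simp only [Bool.not_eq_true] at h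
    simp only [h, Bool.false_eq_true, if_neg, not_false_iff]
    rw [PySem.Dict.getD_insert_self, PySem.Dict.insert_insert_self,
        show d.modify k [] (fun x => x ++ [v]) = d.insert k (d.getD k [] ++ [v]) from rfl,
        PySem.Dict.getD_of_not_contains d ([] : List (List Int)) h]

-- A's validation loop builds exactly the two column maps
theorem buildLoop (regs : List (List Int)) (s0 e0 : List Int) (l0 : Int) :
    (regs.foldl (fun (st : List Int × List Int × Int) region =>
        (st.1 ++ [PySem.List.pyGetD region 0 0],
         st.2.1 ++ [PySem.List.pyGetD region 1 0],
         PySem.List.pyGetD region 1 0)) (s0, e0, l0)) =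
    (s0 ++ regs.map (fun r => PySem.List.pyGetD r 0 0),
     e0 ++ regs.map (fun r => PySem.List.pyGetD r 1 0),
     (regs.map (fun r => PySem.List.pyGetD r 1 0)).foldl (fun _ x => x) l0) := by
  induction regs generalizing s0 e0 l0 with
  | nil => simp
  | cons r rs ih => simp [ih, List.append_assoc]

-- chained, internally ordered regions are pairwise ordered in both columns
theorem chain_pairwise {α : Type} (fS fE : α → Int) (regs : List α)
    (h1 : ∀ r ∈ regs, fS r ≤ fE r)
    (h2 : List.IsChain (fun a b => fE a ≤ fS b) regs) :
    regs.Pairwise (fun a b => fS a ≤ fS b ∧ fE a ≤ fE b) := by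
  induction regs with
  | nil => exact List.Pairwise.nil
  | cons r rs ih =>
    have hrs : List.IsChain (fun a b => fE a ≤ fS b) rs := h2.tail
    have hpw := ih (fun x hx => h1 x (List.mem_cons_of_mem _ hx)) hrs
    refine List.Pairwise.cons ?_ hpw
    intro b hb
    match rs, hb with
    | r' :: rs', hb =>
      have hrr' : fE r ≤ fS r' := (List.isChain_cons_cons.mp h2).1
      have hr : fS r ≤ fE r := h1 r (List.mem_cons_self)
      have hr' : fS r' ≤ fE r' := h1 r' (List.mem_cons_of_mem _ List.mem_cons_self)
      rcases List.mem_cons.mp hb with rfl | hb'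
      · exact ⟨by omega, by omega⟩
      · have := List.rel_of_pairwise_cons hpw hb'
        exact ⟨by omega, by omega⟩

-- the bisect test on sorted columns is the linear overlap scan
theorem classify {α : Type} (fS fE : α → Int) (regs : List α) (a b : Int)
    (hpw : regs.Pairwise (fun r1 r2 => fS r1 ≤ fS r2 ∧ fE r1 ≤ fE r2)) :
    (PySem.List.bisectRight (regs.map fE) a < PySem.List.bisectLeft (regs.map fS) b) ↔
    ∃ r ∈ regs, fS r < b ∧ a < fE r := by
  have hpwS : List.Pairwise (fun x1 x2 => x1 ≤ x2) (regs.map fS) :=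
    (List.pairwise_map).mpr (hpw.imp (fun h => h.1))
  have hpwE : List.Pairwise (fun x1 x2 => x1 ≤ x2) (regs.map fE) :=
    (List.pairwise_map).mpr (hpw.imp (fun h => h.2))
  obtain ⟨heL, he1, he2⟩ := PySem.List.bisectRight_spec (regs.map fE) a hpwE
  obtain ⟨hsL, hs1, hs2⟩ := PySem.List.bisectLeft_spec (regs.map fS) b hpwS
  set e := PySem.List.bisectRight (regs.map fE) a with hedef
  set s := PySem.List.bisectLeft (regs.map fS) b with hsdef
  simp only [List.length_map] at heL hsL he1 he2 hs1 hs2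
  constructor
  · intro hlt
    have heln : e < regs.length := lt_of_lt_of_le hlt hsL
    refine ⟨regs[e], List.getElem_mem heln, ?_, ?_⟩
    · have := hs1 e (by omega) hlt
      simpa using this
    · have := he2 e (by omega) le_rfl
      simpa using this
  · rintro ⟨r, hr, hSr, hEr⟩
    obtain ⟨i, hi, rfl⟩ := List.mem_iff_getElem.mp hr
    have hie : e ≤ i := by
      by_contra hcon
      have := he1 i hi (by omega)
      simp only [List.getElem_map] at this
      omega
    have his : i < s := by
      by_contra hcon
      have := hs2 i hi (by omega)
      simp only [List.getElem_map] at this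
      omega
    omega

-- ===== VERDICT (by name: the statement is the Claim_ definition above) =====
theorem get_overlap_info_numID_spec : Claim_equal_get_overlap_info_numID := by
  intro islands regions _ hpre
  unfold Spec_get_overlap_info_numID get_overlap_info_numID get_overlap_info_numID_alt
  simp only []
  suffices h :
      (List.foldl
        (fun (acc : PySem.Dict String (List (List Int)) × PySem.Dict String (List (List Int))) p =>
          if (PySem.Dict.mk regions).contains p.1 = false then
            (acc.1, List.foldl (fun nv island => pyAppendA nv p.1 island) acc.2 p.2)
          else
            List.foldl
              (fun a2 island =>
                if
                    PySem.List.bisectRight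
                        (List.foldl
                              (fun st region =>
                                (st.1 ++ [PySem.List.pyGetD region 0 0], st.2.1 ++ [PySem.List.pyGetD region 1 0],
                                  PySem.List.pyGetD region 1 0))
                              ([], [], 0) ((PySem.Dict.mk regions).getD p.1 [])).2.1
                        (PySem.List.pyGetD island 0 0) <
                      PySem.List.bisectLeft
                        (List.foldl
                            (fun st region =>
                              (st.1 ++ [PySem.List.pyGetD region 0 0], st.2.1 ++ [PySem.List.pyGetD region 1 0],
                                PySem.List.pyGetD region 1 0))
                            ([], [], 0) ((PySem.Dict.mk regions).getD p.1 [])).1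
                        (PySem.List.pyGetD island 1 0) then
                  (pyAppendA a2.1 p.1 island, a2.2)
                else (a2.1, pyAppendA a2.2 p.1 island))
              acc p.2)
        (PySem.Dict.empty, PySem.Dict.empty) islands) =
      (List.foldl
        (fun (acc : PySem.Dict String (List (List Int)) × PySem.Dict String (List (List Int))) p =>
          List.foldl
            (fun a2 island =>
              if
                  (((PySem.Dict.mk regions).getD p.1 []).any fun r =>
                      decide (PySem.List.pyGetD r 0 0 < PySem.List.pyGetD island 1 0) &&
                        decide (PySem.List.pyGetD r 1 0 > PySem.List.pyGetD island 0 0)) =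
                    true then
                (a2.1.modify p.1 [] fun x => x ++ [island], a2.2)
              else (a2.1, a2.2.modify p.1 [] fun x => x ++ [island]))
            acc p.2)
        (PySem.Dict.empty, PySem.Dict.empty) islands) by rw [h]
  apply PySem.List.foldl_congr_mem
  intro acc p hp
  by_cases hc : (PySem.Dict.mk regions).contains p.1 = true
  · -- chromosome present in regions
    obtain ⟨hreg, hch, _, hisl⟩ := hpre p hp hc
    simp only [hc]
    rw [buildLoop]
    apply PySem.List.foldl_congr_mem
    intro a2 island hisland
    rw [pyAppendA_eq_modify, pyAppendA_eq_modify]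
    have hiff := classify (fun r => PySem.List.pyGetD r 0 0) (fun r => PySem.List.pyGetD r 1 0)
      ((PySem.Dict.mk regions).getD p.1 [])
      (PySem.List.pyGetD island 0 0) (PySem.List.pyGetD island 1 0)
      (chain_pairwise _ _ _ (fun r hr => (hreg r hr).2) hch)
    have hany : (((PySem.Dict.mk regions).getD p.1 []).any (fun r =>
        decide (PySem.List.pyGetD r 0 0 < PySem.List.pyGetD island 1 0) &&
        decide (PySem.List.pyGetD r 1 0 > PySem.List.pyGetD island 0 0))) =
        decide (PySem.List.bisectRight
            (((PySem.Dict.mk regions).getD p.1 []).map (fun r => PySem.List.pyGetD r 1 0))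
            (PySem.List.pyGetD island 0 0) <
          PySem.List.bisectLeft
            (((PySem.Dict.mk regions).getD p.1 []).map (fun r => PySem.List.pyGetD r 0 0))
            (PySem.List.pyGetD island 1 0)) := by
      rcases h : (((PySem.Dict.mk regions).getD p.1 []).any (fun r =>
        decide (PySem.List.pyGetD r 0 0 < PySem.List.pyGetD island 1 0) &&
        decide (PySem.List.pyGetD r 1 0 > PySem.List.pyGetD island 0 0))) with _ | _
      · simp only [List.any_eq_false] at h
        symm; simp only [decide_eq_false_iff_not]
        rw [hiff]
        rintro ⟨r, hr, h1, h2⟩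
        simp only [] at h1 h2
        have := h r hr
        simp only [Bool.and_eq_true, decide_eq_true_eq, not_and, gt_iff_lt] at this
        omega
      · simp only [List.any_eq_true] at h
        symm; simp only [decide_eq_true_eq]
        rw [hiff]
        obtain ⟨r, hr, hb⟩ := h
        simp only [Bool.and_eq_true, decide_eq_true_eq, gt_iff_lt] at hb
        exact ⟨r, hr, hb.1, hb.2⟩
    rw [hany]
    by_cases hlt : (PySem.List.bisectRight
            (((PySem.Dict.mk regions).getD p.1 []).map (fun r => PySem.List.pyGetD r 1 0))
            (PySem.List.pyGetD island 0 0) <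
          PySem.List.bisectLeft
            (((PySem.Dict.mk regions).getD p.1 []).map (fun r => PySem.List.pyGetD r 0 0))
            (PySem.List.pyGetD island 1 0))
    · simp [hlt]
    · simp [hlt]
  · -- chromosome absent: B sees regs = [] so any is false
    simp only [Bool.not_eq_true] at hc
    simp only [hc, if_true,
      PySem.Dict.getD_of_not_contains _ _ hc, List.any_nil, Bool.false_eq_true, if_neg,
      not_false_iff]
    rw [PySem.List.foldl_prod_mk
          (f := fun (x : PySem.Dict String (List (List Int))) (_ : List Int) => x)
          (g := fun (d : PySem.Dict String (List (List Int))) island =>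
            d.modify p.1 [] (fun x => x ++ [island])),
        PySem.List.foldl_ignore]
    exact congrArg (fun d => (acc.1, d))
      (PySem.List.foldl_congr_mem _ _ _ _ (fun a2 island _ => pyAppendA_eq_modify a2 p.1 island))
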